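-- pv_equiv track=rewrite | github.com/nassuphis/specparser | expander.py | _scan_list_body
-- ===== SOURCE A (Python) =====
-- def _scan_balanced(s: str, start: int, open_ch: str, close_ch: str) -> int | None:
--     """
--     Given s[start] == open_ch, return index one-past matching close_ch.
--     Supports nesting of the same delimiter type.
--     """
--     depth = 1
--     i = start + 1
--     n = len(s)
--     while i < n and depth > 0:
--         if s[i] == open_ch:
--             depth += 1
--         elif s[i] == close_ch:
--             depth -= 1
--         i += 1
--     return i if depth == 0 else None
--
-- def _scan_list_body(s: str, lbrack_index: int) -> int | None:
--     """
--     Find matching ']' for '[' at lbrack_index, skipping protected regions inside: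
--       @{...}, ${...}, {...}, and nested [...]
--     """
--     i = lbrack_index + 1
--     n = len(s)
--     while i < n:
--         ch = s[i]
--
--         if ch == "@" and i + 1 < n and s[i + 1] == "{":
--             end = _scan_balanced(s, i + 1, "{", "}")
--             if end is None:
--                 return None
--             i = end
--             continue
--
--         if ch == "$" and i + 1 < n and s[i + 1] == "{":
--             end = _scan_balanced(s, i + 1, "{", "}")
--             if end is None:
--                 return None
--             i = end
--             continue
--
--         if ch == "{":
--             end = _scan_balanced(s, i, "{", "}")
--             if end is None:
--                 return None
--             i = end
--             continue
--
--         if ch == "[":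
--             end = _scan_balanced(s, i, "[", "]")
--             if end is None:
--                 return None
--             i = end
--             continue
--
--         if ch == "]":
--             return i + 1
--
--         i += 1
--
--     return None
-- ===== SOURCE B (Python) =====
-- def _scan_list_body(s: str, lbrack_index: int) -> int | None:
--     """
--     Find matching ']' for '[' at lbrack_index as a single flat state machine:
--     mode is None at the rich top level, or the expected closing delimiter of
--     the protected region currently being skipped; depth counts its nesting.
--     """
--     n = len(s)
--     i = lbrack_index + 1
--     mode = None
--     depth = 0
--     while i < n:
--         ch = s[i]
--         if mode is None:
--             if ch == "]":
--                 return i + 1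
--             if ch == "[":
--                 mode, depth = "]", 1
--             elif ch == "{":
--                 mode, depth = "}", 1
--             elif ch in "@$" and i + 1 < n and s[i + 1] == "{":
--                 mode, depth = "}", 1
--                 i += 1
--         else:
--             opener = "{" if mode == "}" else "["
--             if ch == opener:
--                 depth += 1
--             elif ch == mode:
--                 depth -= 1
--                 if depth == 0:
--                     mode = None
--         i += 1
--     return None
-- ===== Notes on version B (the rewrite author's own statement) =====
-- stated objective: alternative
-- what changed: Replaced A's helper-based design (outer scan that calls a nested _scan_balanced sub-loop for each protected region) by one flat state-machine loop over the characters keeping a mode (rich vs expected closing delimiter) and a depth counter.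
-- outside the precondition, e.g. on _scan_list_body('x]', -4): A raises IndexError, B raises IndexError
import Mathlib
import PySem

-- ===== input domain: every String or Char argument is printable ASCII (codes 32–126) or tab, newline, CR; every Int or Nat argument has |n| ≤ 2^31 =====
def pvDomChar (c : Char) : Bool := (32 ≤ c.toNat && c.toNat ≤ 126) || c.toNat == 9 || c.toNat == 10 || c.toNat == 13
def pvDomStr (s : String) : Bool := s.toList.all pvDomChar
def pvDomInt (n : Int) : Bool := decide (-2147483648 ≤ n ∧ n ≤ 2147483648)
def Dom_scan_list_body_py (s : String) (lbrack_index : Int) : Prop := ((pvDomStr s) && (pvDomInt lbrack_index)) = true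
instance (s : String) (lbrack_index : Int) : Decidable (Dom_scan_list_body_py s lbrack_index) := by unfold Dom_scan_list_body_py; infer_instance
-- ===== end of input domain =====

-- B replaces A's helper-based nested scans by one flat state-machine loop (mode + depth); same cost, different decomposition.

-- ===== PORT A =====
-- _scan_balanced's while loop; fuel bounds the remaining iterations (n - i); Option.elim none (fun c => …) = s[i] with IndexError ↦ none
def pvScanBalAux (cs : List Char) (oC cC : Char) : Nat → Int → Int → Option Int
  | 0, i, d => if d = 0 then some i else none
  | f+1, i, d =>
    if i < (cs.length : Int) ∧ 0 < d then
      (PySem.List.pyGet? cs i).elim none (fun c =>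
        pvScanBalAux cs oC cC f (i+1) (if c = oC then d+1 else if c = cC then d-1 else d))
    else if d = 0 then some i else none

def pvScanBalanced (cs : List Char) (start : Int) (oC cC : Char) : Option Int :=
  pvScanBalAux cs oC cC ((cs.length : Int) - (start+1)).toNat (start+1) 1

-- _scan_list_body's outer while loop
def pvScanListAux (cs : List Char) : Nat → Int → Option Int
  | 0, _ => none
  | f+1, i =>
    if i < (cs.length : Int) then
      (PySem.List.pyGet? cs i).elim none (fun ch =>
        if ch = '@' ∧ i+1 < (cs.length : Int) ∧ PySem.List.pyGet? cs (i+1) = some '{' then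
          (pvScanBalanced cs (i+1) '{' '}').elim none (fun e => pvScanListAux cs f e)
        else if ch = '$' ∧ i+1 < (cs.length : Int) ∧ PySem.List.pyGet? cs (i+1) = some '{' then
          (pvScanBalanced cs (i+1) '{' '}').elim none (fun e => pvScanListAux cs f e)
        else if ch = '{' then
          (pvScanBalanced cs i '{' '}').elim none (fun e => pvScanListAux cs f e)
        else if ch = '[' then
          (pvScanBalanced cs i '[' ']').elim none (fun e => pvScanListAux cs f e)
        else if ch = ']' then some (i+1)
        else pvScanListAux cs f (i+1))
    else none

def scan_list_body_py (s : String) (lbrack_index : Int) : Option Int :=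
  let cs := s.toList
  pvScanListAux cs ((cs.length : Int) - (lbrack_index+1)).toNat (lbrack_index+1)

-- ===== PORT B =====
-- the single flat while loop of Source B: state = (i, mode, depth)
def pvAltAux (cs : List Char) : Nat → Int → Option Char → Int → Option Int
  | 0, _, _, _ => none
  | f+1, i, mode, depth =>
    if i < (cs.length : Int) then
      (PySem.List.pyGet? cs i).elim none (fun ch =>
        mode.elim
          (if ch = ']' then some (i+1)
           else if ch = '[' then pvAltAux cs f (i+1) (some ']') 1
           else if ch = '{' then pvAltAux cs f (i+1) (some '}') 1
           else if (ch = '@' ∨ ch = '$') ∧ i+1 < (cs.length : Int) ∧ PySem.List.pyGet? cs (i+1) = some '{' then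
             pvAltAux cs f (i+2) (some '}') 1
           else pvAltAux cs f (i+1) none depth)
          (fun m =>
            if ch = (if m = '}' then '{' else '[') then pvAltAux cs f (i+1) (some m) (depth+1)
            else if ch = m then
              (if depth - 1 = 0 then pvAltAux cs f (i+1) none 0
               else pvAltAux cs f (i+1) (some m) (depth-1))
            else pvAltAux cs f (i+1) (some m) depth))
    else none

def scan_list_body_py_alt (s : String) (lbrack_index : Int) : Option Int :=
  let cs := s.toList
  pvAltAux cs ((cs.length : Int) - (lbrack_index+1)).toNat (lbrack_index+1) none 0

-- ===== PRECONDITION & SPEC =====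
-- Pre_ excludes exactly the inputs where Python's s[i] wraps past -len(s): there both A and B raise IndexError.
def Pre_scan_list_body_py (s : String) (lbrack_index : Int) : Prop :=
  -(s.length : Int) ≤ lbrack_index + 1
instance (s : String) (lbrack_index : Int) : Decidable (Pre_scan_list_body_py s lbrack_index) := by unfold Pre_scan_list_body_py; infer_instance
def pvWitness_scan_list_body_py : String × Int := ("a{]}]", 0)

def Spec_scan_list_body_py (s : String) (lbrack_index : Int) (out : Option Int) : Prop := out = scan_list_body_py_alt s lbrack_index
instance (s : String) (lbrack_index : Int) (out : Option Int) : Decidable (Spec_scan_list_body_py s lbrack_index out) := by unfold Spec_scan_list_body_py; infer_instance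

-- ===== CLAIM (what is proved, stated in full; the proofs are below) =====
def Claim_equal_scan_list_body_py : Prop := ∀ (s : String) (lbrack_index : Int), Dom_scan_list_body_py s lbrack_index → Pre_scan_list_body_py s lbrack_index → Spec_scan_list_body_py s lbrack_index (scan_list_body_py s lbrack_index)

-- ===== LEMMAS AND PROOFS =====

-- a successful balanced scan never moves left of its starting index
theorem pvScanBal_le {cs : List Char} {oC cC : Char} :
    ∀ {f : Nat} {i d e : Int}, pvScanBalAux cs oC cC f i d = some e → i ≤ e := by
  intro f
  induction f with
  | zero =>
    intro i d e h
    simp only [pvScanBalAux] at h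
    split at h <;> simp_all
  | succ f ih =>
    intro i d e h
    simp only [pvScanBalAux] at h
    split at h
    · rcases hg : PySem.List.pyGet? cs i with _ | c <;>
        rw [hg] at h <;> simp only [Option.elim_none, Option.elim_some] at h
      · exact absurd h (by simp)
      · have := ih h; omega
    · split at h <;> simp_all

-- with depth 0 the balanced scan stops immediately
theorem pvScanBal_zero {cs : List Char} {oC cC : Char} :
    ∀ (f : Nat) (i : Int), pvScanBalAux cs oC cC f i 0 = some i := by
  intro f i
  cases f <;> simp [pvScanBalAux]

-- fuel irrelevance for pvScanBalAux
theorem pvScanBal_fuel {cs : List Char} {oC cC : Char} :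
    ∀ {f g : Nat} {i d : Int}, ((cs.length : Int) - i).toNat ≤ f → ((cs.length : Int) - i).toNat ≤ g →
      pvScanBalAux cs oC cC f i d = pvScanBalAux cs oC cC g i d := by
  intro f
  induction f with
  | zero =>
    intro g i d hf _
    have hni : (cs.length : Int) ≤ i := by omega
    cases g with
    | zero => rfl
    | succ g =>
      have hcond : ¬ (i < (cs.length : Int) ∧ 0 < d) := fun hc => absurd hc.1 (by omega)
      simp only [pvScanBalAux]
      rw [if_neg hcond]
  | succ f ih =>
    intro g i d hf hg
    by_cases hc : i < (cs.length : Int) ∧ 0 < d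
    · obtain ⟨g, rfl⟩ := Nat.exists_eq_succ_of_ne_zero (by omega : g ≠ 0)
      rcases hget : PySem.List.pyGet? cs i with _ | c <;>
        simp only [pvScanBalAux, if_pos hc, hget, Option.elim_none, Option.elim_some]
      exact ih (g := g) (i := i+1) (by omega) (by omega)
    · cases g with
      | zero => simp only [pvScanBalAux, if_neg hc]
      | succ g => simp only [pvScanBalAux, if_neg hc]

-- fuel irrelevance for pvAltAux
theorem pvAlt_fuel {cs : List Char} :
    ∀ {f g : Nat} {i : Int} {m : Option Char} {d : Int},
      ((cs.length : Int) - i).toNat ≤ f → ((cs.length : Int) - i).toNat ≤ g →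
      pvAltAux cs f i m d = pvAltAux cs g i m d := by
  intro f
  induction f with
  | zero =>
    intro g i m d hf _
    have hni : ¬ i < (cs.length : Int) := by omega
    cases g with
    | zero => rfl
    | succ g => simp only [pvAltAux, if_neg hni]
  | succ f ih =>
    intro g i m d hf hg
    by_cases hc : i < (cs.length : Int)
    · obtain ⟨g, rfl⟩ := Nat.exists_eq_succ_of_ne_zero (by omega : g ≠ 0)
      rcases hget : PySem.List.pyGet? cs i with _ | c <;>
        simp only [pvAltAux, if_pos hc, hget, Option.elim_none, Option.elim_some]
      cases m with
      | none =>
        simp only [Option.elim_none]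
        split_ifs <;> first
          | rfl
          | exact ih (g := g) (i := i+1) (by omega) (by omega)
          | exact ih (g := g) (i := i+2) (by omega) (by omega)
      | some m =>
        simp only [Option.elim_some]
        split_ifs <;> exact ih (g := g) (i := i+1) (by omega) (by omega)
    · cases g with
      | zero => simp only [pvAltAux, if_neg hc]
      | succ g => simp only [pvAltAux, if_neg hc]

-- a protected subregion: B's loop in mode (some cC) computes A's _scan_balanced and resumes rich mode
theorem pvAlt_bal {cs : List Char} {oC cC : Char}
    (hpair : (oC = '{' ∧ cC = '}') ∨ (oC = '[' ∧ cC = ']')) :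
    ∀ {f : Nat} {i d : Int}, ((cs.length : Int) - i).toNat ≤ f → 0 < d →
      pvAltAux cs f i (some cC) d =
        (match pvScanBalAux cs oC cC f i d with
          | none => none
          | some e => pvAltAux cs ((cs.length : Int) - e).toNat e none 0) := by
  intro f
  induction f with
  | zero =>
    intro i d hf hd
    simp only [pvAltAux, pvScanBalAux]
    rw [if_neg (fun h : d = 0 => absurd h (by omega))]
  | succ f ih =>
    intro i d hf hd
    by_cases hi : i < (cs.length : Int)
    · rcases hget : PySem.List.pyGet? cs i with _ | c <;>
        simp only [pvAltAux, pvScanBalAux, if_pos hi,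
          if_pos (⟨hi, hd⟩ : i < (cs.length : Int) ∧ 0 < d), hget,
          Option.elim_none, Option.elim_some]
      have hoc : (if cC = '}' then '{' else '[') = oC := by
        rcases hpair with ⟨h1, h2⟩ | ⟨h1, h2⟩ <;> simp [h1, h2]
      simp only [hoc]
      by_cases hco : c = oC
      · rw [if_pos hco, if_pos hco]
        exact ih (by omega) (by omega)
      · rw [if_neg hco, if_neg hco]
        by_cases hcc : c = cC
        · rw [if_pos hcc, if_pos hcc]
          by_cases hd1 : d - 1 = 0
          · rw [if_pos hd1, hd1, pvScanBal_zero]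
            exact pvAlt_fuel (f := f) (g := ((cs.length : Int) - (i+1)).toNat) (by omega) (le_refl _)
          · rw [if_neg hd1]
            rw [ih (by omega) (by omega)]
        · rw [if_neg hcc, if_neg hcc]
          exact ih (by omega) hd
    · have hcond : ¬ (i < (cs.length : Int) ∧ 0 < d) := fun h => hi h.1
      simp only [pvAltAux, pvScanBalAux, if_neg hi, if_neg hcond]
      rw [if_neg (fun h : d = 0 => absurd h (by omega))]

-- the main loop correspondence: A's rich-mode scan equals B's state machine in mode none
theorem pvRich {cs : List Char} :
    ∀ {f g : Nat} {i : Int}, ((cs.length : Int) - i).toNat ≤ f → ((cs.length : Int) - i).toNat ≤ g →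
      pvScanListAux cs f i = pvAltAux cs g i none 0 := by
  intro f
  induction f with
  | zero =>
    intro g i hf hg
    have hni : ¬ i < (cs.length : Int) := by omega
    cases g with
    | zero => rfl
    | succ g => simp only [pvScanListAux, pvAltAux, if_neg hni]
  | succ f ih =>
    intro g i hf hg
    by_cases hi : i < (cs.length : Int)
    · obtain ⟨g, rfl⟩ := Nat.exists_eq_succ_of_ne_zero (by omega : g ≠ 0)
      rcases hget : PySem.List.pyGet? cs i with _ | c <;>
        simp only [pvScanListAux, pvAltAux, if_pos hi, hget,
          Option.elim_none, Option.elim_some]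
      have h12 : (i : Int) + 1 + 1 = i + 2 := by ring
      by_cases hat : (c = '@' ∨ c = '$') ∧ i+1 < (cs.length : Int) ∧ PySem.List.pyGet? cs (i+1) = some '{'
      -- the '@{' / '${' sentinel branches
      · have hnb : c ≠ ']' := by rcases hat.1 with h | h <;> simp [h]
        have hnl : c ≠ '[' := by rcases hat.1 with h | h <;> simp [h]
        have hnc : c ≠ '{' := by rcases hat.1 with h | h <;> simp [h]
        have hun : pvScanBalanced cs (i+1) '{' '}' =
            pvScanBalAux cs '{' '}' ((cs.length : Int) - (i+2)).toNat (i+2) 1 := by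
          unfold pvScanBalanced; rw [h12]
        have hbal :
            pvAltAux cs g (i+2) (some '}') 1 =
              (match pvScanBalAux cs '{' '}' ((cs.length : Int) - (i+2)).toNat (i+2) 1 with
                | none => none
                | some e => pvAltAux cs ((cs.length : Int) - e).toNat e none 0) := by
          rw [pvAlt_bal (Or.inl ⟨rfl, rfl⟩) (by omega) (by omega)]
          rw [pvScanBal_fuel (f := g) (g := ((cs.length : Int) - (i+2)).toNat) (by omega) (by omega)]
        conv_rhs => rw [if_neg hnb, if_neg hnl, if_neg hnc, if_pos hat]
        rw [hbal]
        rcases hat.1 with h | h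
        · conv_lhs => rw [if_pos (⟨h, hat.2⟩ : c = '@' ∧ i+1 < (cs.length : Int) ∧ PySem.List.pyGet? cs (i+1) = some '{'), hun]
          rcases hbr : pvScanBalAux cs '{' '}' ((cs.length : Int) - (i+2)).toNat (i+2) 1 with _ | e
          · rfl
          · have he : i + 2 ≤ e := pvScanBal_le hbr
            simp only [Option.elim_some]
            exact ih (by omega) (le_refl _)
        · have hno : ¬ (c = '@' ∧ i+1 < (cs.length : Int) ∧ PySem.List.pyGet? cs (i+1) = some '{') := by
            simp [h]
          conv_lhs => rw [if_neg hno, if_pos (⟨h, hat.2⟩ : c = '$' ∧ i+1 < (cs.length : Int) ∧ PySem.List.pyGet? cs (i+1) = some '{'), hun]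
          rcases hbr : pvScanBalAux cs '{' '}' ((cs.length : Int) - (i+2)).toNat (i+2) 1 with _ | e
          · rfl
          · have he : i + 2 ≤ e := pvScanBal_le hbr
            simp only [Option.elim_some]
            exact ih (by omega) (le_refl _)
      · have hnat : ¬ (c = '@' ∧ i+1 < (cs.length : Int) ∧ PySem.List.pyGet? cs (i+1) = some '{') := by
          intro h; exact hat ⟨Or.inl h.1, h.2⟩
        have hnds : ¬ (c = '$' ∧ i+1 < (cs.length : Int) ∧ PySem.List.pyGet? cs (i+1) = some '{') := by
          intro h; exact hat ⟨Or.inr h.1, h.2⟩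
        conv_lhs => rw [if_neg hnat, if_neg hnds]
        conv_rhs => rw [if_neg hat]
        by_cases hbr : c = ']'
        · conv_lhs => rw [if_neg (show c ≠ '{' by simp [hbr]), if_neg (show c ≠ '[' by simp [hbr]), if_pos hbr]
          conv_rhs => rw [if_pos hbr]
        · conv_rhs => rw [if_neg hbr]
          by_cases hlb : c = '['
          · conv_lhs => rw [if_neg (show c ≠ '{' by simp [hlb]), if_pos hlb]
            conv_rhs => rw [if_pos hlb]
            have hun : pvScanBalanced cs i '[' ']' =
                pvScanBalAux cs '[' ']' ((cs.length : Int) - (i+1)).toNat (i+1) 1 := rfl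
            conv_lhs => rw [hun]
            rw [pvAlt_bal (Or.inr ⟨rfl, rfl⟩) (by omega) (by omega)]
            rw [pvScanBal_fuel (f := g) (g := ((cs.length : Int) - (i+1)).toNat) (by omega) (by omega)]
            rcases hbr2 : pvScanBalAux cs '[' ']' ((cs.length : Int) - (i+1)).toNat (i+1) 1 with _ | e
            · rfl
            · have he : i + 1 ≤ e := pvScanBal_le hbr2
              simp only [Option.elim_some]
              exact ih (by omega) (le_refl _)
          · conv_rhs => rw [if_neg hlb]
            by_cases hcb : c = '{'
            · conv_lhs => rw [if_pos hcb]
              conv_rhs => rw [if_pos hcb]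
              have hun : pvScanBalanced cs i '{' '}' =
                  pvScanBalAux cs '{' '}' ((cs.length : Int) - (i+1)).toNat (i+1) 1 := rfl
              conv_lhs => rw [hun]
              rw [pvAlt_bal (Or.inl ⟨rfl, rfl⟩) (by omega) (by omega)]
              rw [pvScanBal_fuel (f := g) (g := ((cs.length : Int) - (i+1)).toNat) (by omega) (by omega)]
              rcases hbr2 : pvScanBalAux cs '{' '}' ((cs.length : Int) - (i+1)).toNat (i+1) 1 with _ | e
              · rfl
              · have he : i + 1 ≤ e := pvScanBal_le hbr2
                simp only [Option.elim_some]
                exact ih (by omega) (le_refl _)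
            · conv_lhs => rw [if_neg hcb, if_neg hlb, if_neg hbr]
              conv_rhs => rw [if_neg hcb]
              exact ih (g := g) (i := i+1) (by omega) (by omega)
    · cases g with
      | zero => simp only [pvScanListAux, pvAltAux, if_neg hi]
      | succ g => simp only [pvScanListAux, pvAltAux, if_neg hi]

-- ===== VERDICT (by name: the statement is the Claim_ definition above) =====
theorem scan_list_body_py_spec : Claim_equal_scan_list_body_py := by
  intro s lbrack_index _ _
  unfold Spec_scan_list_body_py scan_list_body_py scan_list_body_py_alt
  exact pvRich (le_refl _) (le_refl _)
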